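-- pv_equiv track=rewrite | github.com/YingZhou001/Immuannot-vdj | src.v0.08/fmt-vdjc-gene.py | read_seq
-- ===== SOURCE A (Python) =====
-- def read_seq(buf) :
--     llst = buf.split('\n')
--     tag = False
--     seq = []
--     for line in llst :
--         if tag :
--             seq.append("".join(filter(lambda x: x.isalpha(), line)))
--         if line[0:2] == 'SQ' :
--             tag = True
--     return("".join(seq))
-- ===== SOURCE B (Python) =====
-- def read_seq(buf):
--     result = None
--     tail = ''
--     for line in reversed(buf.split('\n')):
--         if line[0:2] == 'SQ':
--             result = tail
--         tail = ''.join(c for c in line if c.isalpha()) + tail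
--     return result if result is not None else ''
-- ===== Notes on version B (the rewrite author's own statement) =====
-- stated objective: alternative
-- what changed: Replaces the forward boolean-flag pass with a single right-to-left pass that accumulates the alphabetic suffix and snapshots it at each SQ line (the leftmost SQ snapshot taken last wins), eliminating the flag and the list of per-line strings.
import Mathlib
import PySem

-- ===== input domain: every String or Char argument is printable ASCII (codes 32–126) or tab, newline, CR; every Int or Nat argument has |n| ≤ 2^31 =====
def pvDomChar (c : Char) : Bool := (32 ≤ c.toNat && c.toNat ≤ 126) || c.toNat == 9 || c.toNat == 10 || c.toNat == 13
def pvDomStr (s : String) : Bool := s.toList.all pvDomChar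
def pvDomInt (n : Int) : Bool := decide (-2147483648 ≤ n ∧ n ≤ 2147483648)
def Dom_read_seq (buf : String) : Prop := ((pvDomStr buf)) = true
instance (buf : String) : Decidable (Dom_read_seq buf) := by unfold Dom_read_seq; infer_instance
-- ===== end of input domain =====

-- B replaces A's forward boolean-flag pass by one right-to-left pass that accumulates the
-- alphabetic suffix and snapshots it at each SQ line; objective: alternative (same cost).

-- ===== PORT A =====
-- loop bodies of both ports, one step each:
def pvStepA (st : Bool × List String) (line : String) : Bool × List String :=
  let seq := if st.1 then st.2 ++ [String.ofList (line.toList.filter PySem.Chars.isalpha)] else st.2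
  let tag := if PySem.Str.slice line (some 0) (some 2) == "SQ" then true else st.1
  (tag, seq)

def pvStepB (st : Option String × String) (line : String) : Option String × String :=
  let result := if PySem.Str.slice line (some 0) (some 2) == "SQ" then some st.2 else st.1
  let tail := String.ofList (line.toList.filter PySem.Chars.isalpha) ++ st.2
  (result, tail)

-- A's loop: state (tag, seq); append filtered alpha chars when tag set, then set tag on 'SQ' lines.
def read_seq (buf : String) : String :=
  let llst := (PySem.Str.split? buf "\n").getD []
  let st := llst.foldl pvStepA (false, [])
  PySem.Str.join "" st.2

-- ===== PORT B =====
-- B's loop over reversed(llst): state (result : Option String, tail : String);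
-- snapshot tail into result on SQ lines, then prepend the line's alphabetic chars to tail.
def read_seq_alt (buf : String) : String :=
  let llst := (PySem.Str.split? buf "\n").getD []
  let st := llst.reverse.foldl pvStepB (none, "")
  match st.1 with
  | none => ""
  | some s => s

-- ===== PRECONDITION & SPEC =====
def Spec_read_seq (buf : String) (out : String) : Prop := out = read_seq_alt buf
instance (buf : String) (out : String) : Decidable (Spec_read_seq buf out) := by unfold Spec_read_seq; infer_instance

-- ===== CLAIM (what is proved, stated in full; the proofs are below) =====
def Claim_equal_read_seq : Prop := ∀ (buf : String), Dom_read_seq buf → Spec_read_seq buf (read_seq buf)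

-- ===== LEMMAS AND PROOFS =====

def pvIsSQ (line : String) : Bool := PySem.Str.slice line (some 0) (some 2) == "SQ"

def pvAlpha (line : String) : List Char := line.toList.filter PySem.Chars.isalpha

lemma pvLoop_true (ls : List String) (acc : List String) :
    (ls.foldl pvStepA (true, acc)).2 = acc ++ ls.map (fun l => String.ofList (pvAlpha l)) := by
  induction ls generalizing acc with
  | nil => simp
  | cons l ls ih =>
      simp only [List.foldl_cons, pvStepA, pvAlpha]
      split_ifs <;> rw [ih] <;> simp [pvAlpha]

lemma pvLoop_false (ls : List String) (acc : List String) :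
    (ls.foldl pvStepA (false, acc)).2 =
      acc ++ (match ls.findIdx? pvIsSQ with
              | none => []
              | some i => (ls.drop (i + 1)).map (fun l => String.ofList (pvAlpha l))) := by
  induction ls generalizing acc with
  | nil => simp
  | cons l ls ih =>
      by_cases h : pvIsSQ l = true
      · simp only [List.foldl_cons, pvStepA] at *
        rw [List.findIdx?_cons]
        simp only [pvIsSQ] at h
        simp [pvIsSQ, h, pvLoop_true]
      · simp only [List.foldl_cons, pvStepA, pvIsSQ] at *
        rw [List.findIdx?_cons]
        simp only [pvIsSQ, h, Bool.false_eq_true, if_false]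
        rw [ih]
        cases hfi : ls.findIdx? pvIsSQ <;> simp

lemma pvJoin_ofList (ts : List (List Char)) :
    PySem.Str.join "" (ts.map String.ofList) = String.ofList ts.flatten := by
  induction ts with
  | nil => rfl
  | cons a ts ih =>
      cases ts with
      | nil =>
          apply String.toList_injective
          simp [PySem.Str.toList_join, PySem.Chars.join, List.intercalate]
      | cons b r =>
          simp only [List.map_cons] at ih ⊢
          rw [List.flatten_cons]
          apply String.toList_injective
          have h1 := congrArg String.toList ih
          simp only [PySem.Str.toList_join] at h1 ⊢
          simp only [List.map_cons, String.toList_ofList] at h1 ⊢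
          rw [PySem.Chars.join_cons_cons]
          simp only [List.map_map, show ("" : String).toList = ([] : List Char) from rfl,
            List.flatten_cons] at h1
          simpa using h1

lemma pvMainA (ls : List String) :
    PySem.Str.join "" ((ls.foldl pvStepA (false, ([] : List String))).2) =
      (match ls.findIdx? pvIsSQ with
       | none => ""
       | some i => String.ofList ((ls.drop (i + 1)).flatMap pvAlpha)) := by
  rw [pvLoop_false]
  cases hfi : ls.findIdx? pvIsSQ with
  | none => rfl
  | some i =>
      simp only [List.nil_append]
      generalize ls.drop (i + 1) = ts
      rw [show ts.map (fun l => String.ofList (pvAlpha l)) = (ts.map pvAlpha).map String.ofList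
            from by simp [List.map_map, Function.comp_def], pvJoin_ofList]
      simp [List.flatMap_def]

lemma pvLoopB (ls : List String) :
    ls.reverse.foldl pvStepB (none, "") =
      ((ls.findIdx? pvIsSQ).map (fun i => String.ofList ((ls.drop (i + 1)).flatMap pvAlpha)),
       String.ofList (ls.flatMap pvAlpha)) := by
  rw [List.foldl_reverse]
  induction ls with
  | nil => rfl
  | cons l ls ih =>
      rw [List.foldr_cons]
      show pvStepB (List.foldr (fun x y => pvStepB y x) (none, "") ls) l = _
      rw [ih, List.findIdx?_cons]
      by_cases h : pvIsSQ l = true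
      · simp only [pvIsSQ] at h
        simp [pvStepB, pvIsSQ, h, pvAlpha]
      · simp only [pvIsSQ, beq_iff_eq] at h
        simp only [pvIsSQ, beq_iff_eq, h, if_false]
        cases hfi : ls.findIdx? pvIsSQ <;>
          simp [pvStepB, pvAlpha, h, Option.map, List.flatMap_def]

-- ===== VERDICT (by name: the statement is the Claim_ definition above) =====
theorem read_seq_spec : Claim_equal_read_seq := by
  intro buf _
  show read_seq buf = read_seq_alt buf
  show PySem.Str.join "" (((PySem.Str.split? buf "\n").getD []).foldl pvStepA (false, [])).2 =
      (match (((PySem.Str.split? buf "\n").getD []).reverse.foldl pvStepB (none, "")).1 with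
       | none => "" | some s => s)
  rw [pvLoopB, pvMainA]
  cases ((PySem.Str.split? buf "\n").getD []).findIdx? pvIsSQ <;> rfl
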